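-- pv_equiv track=rewrite | github.com/liubeisong0216/FT-Hypothesis-Generation | evaluate_end_to_end_arc.py | _extract_structured_hypothesis
-- ===== SOURCE A (Python) =====
-- REQUIRED_PREFIXES = [
--     "Describing the input grid:",
--     "Describing the size of the output grid:",
--     "Describing how to transform the grid:",
-- ]
--
-- def _normalize_text(text: str) -> str:
--     return "\n".join(line.strip() for line in text.replace("\r\n", "\n").splitlines() if line.strip()).strip()
--
-- def _extract_structured_hypothesis(text: str) -> str:
--     lines = [line.strip() for line in text.replace("\r\n", "\n").splitlines() if line.strip()]
--     structured: list[str] = []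
--     for prefix in REQUIRED_PREFIXES:
--         match = next((line for line in lines if line.startswith(prefix)), None)
--         if match is None:
--             return _normalize_text(text)
--         structured.append(match)
--     return _normalize_text("\n".join(structured))
-- ===== SOURCE B (Python) =====
-- REQUIRED_PREFIXES = [
--     "Describing the input grid:",
--     "Describing the size of the output grid:",
--     "Describing how to transform the grid:",
-- ]
--
-- def _normalize_text(text: str) -> str:
--     return "\n".join(line.strip() for line in text.replace("\r\n", "\n").splitlines() if line.strip()).strip()
--
-- def _extract_structured_hypothesis(text: str) -> str:
--     # One pass over the normalized lines, indexing the FIRST line per required prefix.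
--     first: dict[str, str] = {}
--     for raw in text.replace("\r\n", "\n").splitlines():
--         line = raw.strip()
--         if not line:
--             continue
--         for prefix in REQUIRED_PREFIXES:
--             if prefix not in first and line.startswith(prefix):
--                 first[prefix] = line
--     if all(p in first for p in REQUIRED_PREFIXES):
--         return _normalize_text("\n".join(first[p] for p in REQUIRED_PREFIXES))
--     return _normalize_text(text)
-- ===== Notes on version B (the rewrite author's own statement) =====
-- stated objective: alternative
-- what changed: Replaces A's three per-prefix scans over the line list with a single pass over the lines that builds a first-match dict keyed by prefix, then joins the dict entries in REQUIRED_PREFIXES order (same missing-prefix fallback).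
import Mathlib
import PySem

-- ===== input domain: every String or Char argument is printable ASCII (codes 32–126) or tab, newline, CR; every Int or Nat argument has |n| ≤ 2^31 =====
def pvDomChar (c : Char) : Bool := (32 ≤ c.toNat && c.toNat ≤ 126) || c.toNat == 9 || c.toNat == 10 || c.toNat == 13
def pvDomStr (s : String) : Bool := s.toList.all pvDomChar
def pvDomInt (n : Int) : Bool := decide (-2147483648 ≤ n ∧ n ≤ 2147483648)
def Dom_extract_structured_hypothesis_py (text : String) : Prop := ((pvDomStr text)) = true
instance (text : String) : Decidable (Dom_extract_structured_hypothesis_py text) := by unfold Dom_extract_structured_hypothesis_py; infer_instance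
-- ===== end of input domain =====

-- B replaces A's three per-prefix scans over the lines by one pass over the lines that
-- builds a first-match dict keyed by prefix (objective: alternative decomposition).

-- shared module context (REQUIRED_PREFIXES and _normalize_text, used by both Pythons)
def pvREQUIRED : List String :=
  ["Describing the input grid:",
   "Describing the size of the output grid:",
   "Describing how to transform the grid:"]

-- [line.strip() for line in text.replace("\r\n", "\n").splitlines() if line.strip()]
def pvLines (text : String) : List String :=
  (PySem.Str.splitlines (PySem.Str.replace text "\r\n" "\n")).filterMap
    (fun line => let s := PySem.Str.strip line; if s = "" then none else some s)

-- _normalize_text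
def pvNormalize (text : String) : String :=
  PySem.Str.strip (PySem.Str.join "\n" (pvLines text))

-- ===== PORT A =====
-- A's for-loop over REQUIRED_PREFIXES; none = the early 'return _normalize_text(text)'
def pvFindLoop (lines : List String) : List String → Option (List String)
  | [] => some []
  | p :: ps =>
    match lines.find? (fun line => PySem.Str.startswith line p) with
    | none => none
    | some m =>
      match pvFindLoop lines ps with
      | none => none
      | some rest => some (m :: rest)

def extract_structured_hypothesis_py (text : String) : String :=
  let lines := pvLines text
  match pvFindLoop lines pvREQUIRED with
  | none => pvNormalize text
  | some structured => pvNormalize (PySem.Str.join "\n" structured)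

-- ===== PORT B =====
-- inner loop of B: record the line as first match of each still-unmatched prefix it starts with
def pvStep (d : PySem.Dict String String) (line : String) : PySem.Dict String String :=
  pvREQUIRED.foldl
    (fun d p => if d.contains p = false && PySem.Str.startswith line p then d.insert p line else d) d

def extract_structured_hypothesis_py_alt (text : String) : String :=
  let first := (pvLines text).foldl pvStep PySem.Dict.empty
  if pvREQUIRED.all (fun p => first.contains p) then
    -- first[p]: guarded by the 'all present' branch, so the default is never used
    pvNormalize (PySem.Str.join "\n" (pvREQUIRED.map (fun p => first.getD p "")))
  else
    pvNormalize text

-- ===== PRECONDITION & SPEC =====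
def Spec_extract_structured_hypothesis_py (text : String) (out : String) : Prop := out = extract_structured_hypothesis_py_alt text
instance (text : String) (out : String) : Decidable (Spec_extract_structured_hypothesis_py text out) := by unfold Spec_extract_structured_hypothesis_py; infer_instance

-- ===== CLAIM (what is proved, stated in full; the proofs are below) =====
def Claim_equal_extract_structured_hypothesis_py : Prop := ∀ (text : String), Dom_extract_structured_hypothesis_py text → Spec_extract_structured_hypothesis_py text (extract_structured_hypothesis_py text)

-- ===== LEMMAS AND PROOFS =====

-- one inner-loop step of B, seen through get?: a still-unmatched key q that the line
-- starts with gets the line; everything else is unchanged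
theorem pvStep1_get? (d : PySem.Dict String String) (line q p : String) :
    ((fun (d : PySem.Dict String String) (q : String) =>
        if d.contains q = false && PySem.Str.startswith line q then d.insert q line else d) d q).get? p
      = if p = q ∧ d.get? p = none ∧ PySem.Str.startswith line p then some line else d.get? p := by
  by_cases hpq : p = q
  · subst hpq
    simp only [PySem.Dict.contains_eq_isSome_get?]
    split_ifs with hc h2 h2 <;>
      simp_all [PySem.Dict.get?_insert_self]
  · rw [if_neg (by exact fun h => hpq h.1)]
    beta_reduce
    split_ifs with hc
    · exact PySem.Dict.get?_insert_of_ne d line hpq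
    · rfl

-- lookup after one whole pvStep, for a required prefix
theorem pvStep_get? (d : PySem.Dict String String) (line p : String) (hp : p ∈ pvREQUIRED) :
    (pvStep d line).get? p =
      if d.get? p = none ∧ PySem.Str.startswith line p then some line else d.get? p := by
  simp only [pvREQUIRED, List.mem_cons, List.not_mem_nil, or_false] at hp
  simp only [pvStep, pvREQUIRED, List.foldl]
  rcases hp with h | h | h <;> subst h <;>
    simp only [pvStep1_get?] <;>
    simp [show ("Describing the input grid:" : String) ≠ "Describing the size of the output grid:" by decide,
          show ("Describing the input grid:" : String) ≠ "Describing how to transform the grid:" by decide,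
          show ("Describing the size of the output grid:" : String) ≠ "Describing the input grid:" by decide,
          show ("Describing the size of the output grid:" : String) ≠ "Describing how to transform the grid:" by decide,
          show ("Describing how to transform the grid:" : String) ≠ "Describing the input grid:" by decide,
          show ("Describing how to transform the grid:" : String) ≠ "Describing the size of the output grid:" by decide]

-- lookup after B's whole pass = the first line starting with the prefix (seeded from d)
theorem foldl_pvStep_get? (lines : List String) (d : PySem.Dict String String) (p : String)
    (hp : p ∈ pvREQUIRED) :
    (lines.foldl pvStep d).get? p =
      match d.get? p with
      | some v => some v
      | none => lines.find? (fun line => PySem.Str.startswith line p) := by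
  induction lines generalizing d with
  | nil => cases h : d.get? p <;> (rw [List.foldl_nil, h]; try rfl)
  | cons l ls ih =>
    rw [List.foldl_cons, ih, pvStep_get? d l p hp]
    cases h : d.get? p with
    | some v => simp
    | none =>
      cases hs : PySem.Str.startswith l p <;>
        (simp only [PySem.Str.startswith_eq] at hs; simp [hs, List.find?])

theorem pv_extract_eq (text : String) :
    extract_structured_hypothesis_py text = extract_structured_hypothesis_py_alt text := by
  have g : ∀ p, p ∈ pvREQUIRED →
      ((pvLines text).foldl pvStep PySem.Dict.empty).get? p =
        (pvLines text).find? (fun line => PySem.Str.startswith line p) := by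
    intro p hp
    rw [foldl_pvStep_get? _ _ _ hp, PySem.Dict.get?_empty]
  have g1 := g "Describing the input grid:" (by simp [pvREQUIRED])
  have g2 := g "Describing the size of the output grid:" (by simp [pvREQUIRED])
  have g3 := g "Describing how to transform the grid:" (by simp [pvREQUIRED])
  unfold extract_structured_hypothesis_py extract_structured_hypothesis_py_alt
  simp only [pvREQUIRED, List.all_cons, List.all_nil, List.map_cons, List.map_nil,
    PySem.Dict.contains_eq_isSome_get?, PySem.Dict.getD_eq_get?_getD, g1, g2, g3]
  cases h1 : (pvLines text).find? (fun line => PySem.Str.startswith line "Describing the input grid:") <;>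
  cases h2 : (pvLines text).find? (fun line => PySem.Str.startswith line "Describing the size of the output grid:") <;>
  cases h3 : (pvLines text).find? (fun line => PySem.Str.startswith line "Describing how to transform the grid:") <;>
    simp only [pvFindLoop, h1, h2, h3] <;> simp

-- ===== VERDICT (by name: the statement is the Claim_ definition above) =====
theorem extract_structured_hypothesis_py_spec : Claim_equal_extract_structured_hypothesis_py := by
  intro text _
  exact pv_extract_eq text
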